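-- pv_equiv track=rewrite | github.com/dapitch666/AdventOfCodePython | aoc/year2025/day06.py | parse
-- ===== SOURCE A (Python) =====
-- from typing import List, Tuple
--
-- def parse(raw: str) -> Tuple[List[List[str]], List[str]]:
--     """
--     Return a list of problem chunks (each chunk is a list of the number-rows as strings)
--     and a parallel list of operation characters (one per chunk).
--     """
--     lines = raw.splitlines()
--     max_len = max(len(l) for l in lines)
--     lines = [l.ljust(max_len) for l in lines]
--
--     # determine which columns are completely blank
--     is_blank_col = [all(line[col] == " " for line in lines) for col in range(max_len)]
--
--     # find contiguous ranges of non-blank columns (each is one problem)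
--     blocks: List[Tuple[int, int]] = []
--     i = 0
--     while i < max_len:
--         if not is_blank_col[i]:
--             start = i
--             while i < max_len and not is_blank_col[i]:
--                 i += 1
--             blocks.append((start, i))
--         else:
--             i += 1
--
--     chunks: List[List[str]] = []
--     ops: List[str] = []
--     for start, end in blocks:
--         chunk_rows = [line[start:end] for line in lines]
--         op_row = chunk_rows[-1]
--         op = next((c for c in op_row if c != " "), "")
--         if op:
--             # store only the number-rows (all rows except the last/op row)
--             chunks.append(chunk_rows[:-1])
--             ops.append(op)
--
--     return chunks, ops
-- ===== SOURCE B (Python) =====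
-- from itertools import groupby
-- from typing import List, Tuple
--
--
-- def parse(raw: str) -> Tuple[List[List[str]], List[str]]:
--     lines = raw.splitlines()
--     width = max(len(l) for l in lines)
--     padded = [l.ljust(width) for l in lines]
--     n = len(lines)
--
--     # column-string representation of the grid
--     cols = ["".join(row[i] for row in padded) for i in range(width)]
--
--     chunks: List[List[str]] = []
--     ops: List[str] = []
--     # runs of consecutive non-blank columns are the problem blocks
--     for blank, grp in groupby(enumerate(cols), key=lambda t: t[1] == " " * n):
--         if blank:
--             continue
--         block = [c for _, c in grp]
--         rows = ["".join(col[r] for col in block) for r in range(n)]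
--         op = rows[-1].lstrip(" ")
--         if op:
--             chunks.append(rows[:-1])
--             ops.append(op[0])
--     return chunks, ops
-- ===== Notes on version B (the rewrite author's own statement) =====
-- stated objective: idiomatic
-- what changed: B transposes the padded grid into column strings and uses itertools.groupby over enumerate(cols) keyed on all-space columns to collect the problem blocks, instead of A's explicit is_blank_col table plus nested while-loops over column indices and per-block re-slicing of the rows.
-- outside the precondition, e.g. on parse(''): A raises ValueError, B raises ValueError
import Mathlib
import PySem

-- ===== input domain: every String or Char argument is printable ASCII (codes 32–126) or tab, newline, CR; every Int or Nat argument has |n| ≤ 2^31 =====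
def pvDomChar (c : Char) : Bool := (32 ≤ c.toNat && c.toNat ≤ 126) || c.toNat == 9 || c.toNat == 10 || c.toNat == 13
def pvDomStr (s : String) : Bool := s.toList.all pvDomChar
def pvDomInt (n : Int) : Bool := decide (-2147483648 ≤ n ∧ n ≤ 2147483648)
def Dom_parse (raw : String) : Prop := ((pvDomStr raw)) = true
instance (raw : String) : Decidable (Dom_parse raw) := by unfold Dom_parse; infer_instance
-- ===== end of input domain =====

-- B replaces A's is_blank_col table and nested index while-loops by a column-string
-- transposition grouped with a groupby-style run splitter; return values agree on Pre_.

-- ===== PORT A =====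

-- l.ljust(w) (space fill)
def padA (w : Nat) (l : List Char) : List Char := l ++ List.replicate (w - l.length) ' '

-- is_blank_col[c] = all(line[col] == " " for line in lines); columns are in range after
-- padding, so getD is exact for Python's line[col]
def isbOf (padded : List (List Char)) (c : Nat) : Bool :=
  padded.all (fun l => l.getD c ' ' == ' ')

-- inner while: 'while i < max_len and not is_blank_col[i]: i += 1'
def advA (isb : Nat → Bool) (w i : Nat) : Nat :=
  if i < w then (if isb i then i else advA isb w (i + 1)) else i
termination_by w - i
decreasing_by omega

theorem advA_stepf (isb : Nat → Bool) (w i : Nat) (h : i < w) (hb : isb i = false) :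
    advA isb w i = advA isb w (i + 1) := by
  rw [advA, if_pos h, if_neg (by simp [hb])]

theorem le_advA (isb : Nat → Bool) (w i : Nat) : i ≤ advA isb w i := by
  unfold advA
  split
  · split
    · exact le_refl _
    · have := le_advA isb w (i + 1); omega
  · exact le_refl _
termination_by w - i
decreasing_by omega

-- outer while: collect the (start, end) blocks of consecutive non-blank columns
def blocksA (isb : Nat → Bool) (w i : Nat) : List (Nat × Nat) :=
  if h : i < w then
    if hb : isb i then blocksA isb w (i + 1)
    else (i, advA isb w i) :: blocksA isb w (advA isb w i)
  else []
termination_by w - i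
decreasing_by
  · omega
  · have h1 := advA_stepf isb w i h (Bool.of_not_eq_true hb)
    have h2 := le_advA isb w (i + 1)
    omega

-- body of A's 'for start, end in blocks' loop
def stepA (padded : List (List Char)) (acc : List (List String) × List String)
    (b : Nat × Nat) : List (List String) × List String :=
  let chunk_rows := padded.map (fun l => PySem.List.slice l (some (b.1 : Int)) (some (b.2 : Int)))
  let op_row := chunk_rows.getLastD []          -- chunk_rows[-1]; in range: lines ≠ [] whenever blocks ≠ []
  match op_row.find? (fun c => c != ' ') with   -- next((c for c in op_row if c != " "), "")
  | some c => (acc.1 ++ [chunk_rows.dropLast.map String.ofList], acc.2 ++ [String.ofList [c]])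
  | none => acc                                 -- op == "" : skipped

def parse (raw : String) : List (List String) × List String :=
  let lines0 := (PySem.Str.splitlines raw).map String.toList
  -- max(len(l) for l in lines): ValueError on the empty list, excluded by Pre_parse
  let w := (PySem.List.max? (lines0.map (·.length)) (fun x => x)).getD 0
  let lines := lines0.map (padA w)
  (blocksA (isbOf lines) w 0).foldl (stepA lines) ([], [])

-- ===== PORT B =====

-- column i of the padded grid, as "".join(row[i] for row in padded)
def colAt (padded : List (List Char)) (i : Nat) : List Char :=
  padded.map (fun row => row.getD i ' ')

def keyOf (n : Nat) (t : Int × List Char) : Bool := t.2 == List.replicate n ' '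

-- itertools.groupby: maximal runs of equal key, left to right
def groupRunsB (key : Int × List Char → Bool) :
    List (Int × List Char) → List (Bool × List (Int × List Char))
  | [] => []
  | x :: xs =>
      (key x, x :: xs.takeWhile (fun y => key y == key x))
        :: groupRunsB key (xs.dropWhile (fun y => key y == key x))
termination_by l => l.length
decreasing_by simp [Nat.lt_succ_of_le, List.length_dropWhile_le]

-- body of B's 'for blank, grp in groupby(...)' loop
def stepB (n : Nat) (acc : List (List String) × List String)
    (g : Bool × List (Int × List Char)) : List (List String) × List String :=
  if g.1 then acc
  else
    let block := g.2.map (·.2)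
    let rows := (List.range n).map (fun r => block.map (fun col => col.getD r ' '))
    match (rows.getLastD []).dropWhile (fun c => c == ' ') with   -- rows[-1].lstrip(" ")
    | [] => acc
    | c :: _ => (acc.1 ++ [rows.dropLast.map String.ofList], acc.2 ++ [String.ofList [c]])

def parse_alt (raw : String) : List (List String) × List String :=
  let lines0 := (PySem.Str.splitlines raw).map String.toList
  let w := (PySem.List.max? (lines0.map (·.length)) (fun x => x)).getD 0
  let padded := lines0.map (fun l => l ++ List.replicate (w - l.length) ' ')
  let n := padded.length
  let cols := (List.range w).map (colAt padded)
  (groupRunsB (keyOf n) (PySem.List.enumerate cols 0)).foldl (stepB n) ([], [])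

-- ===== PRECONDITION & SPEC =====
-- Pre_ excludes only raw = "", where both Pythons raise ValueError on max() of no lines.
def Pre_parse (raw : String) : Prop := raw ≠ ""
instance (raw : String) : Decidable (Pre_parse raw) := by unfold Pre_parse; infer_instance
def pvWitness_parse : String := "12 34\n+   *"

def Spec_parse (raw : String) (out : List (List String) × List String) : Prop := out = parse_alt raw
instance (raw : String) (out : List (List String) × List String) : Decidable (Spec_parse raw out) := by unfold Spec_parse; infer_instance

-- ===== CLAIM (what is proved, stated in full; the proofs are below) =====
def Claim_equal_parse : Prop := ∀ (raw : String), Dom_parse raw → Pre_parse raw → Spec_parse raw (parse raw)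

-- ===== LEMMAS AND PROOFS =====

theorem advA_le (isb : Nat → Bool) (w i : Nat) (h : i ≤ w) : advA isb w i ≤ w := by
  unfold advA
  split
  · split
    · exact h
    · exact advA_le isb w (i + 1) (by omega)
  · exact h
termination_by w - i
decreasing_by omega

theorem advA_gt (isb : Nat → Bool) (w i : Nat) (hi : i < w) (hb : isb i = false) :
    i + 1 ≤ advA isb w i := by
  rw [advA, if_pos hi, if_neg (by simp [hb])]
  exact le_advA isb w (i + 1)

theorem key_eq_isb (padded : List (List Char)) (j : Nat) (s : Int) :
    keyOf padded.length (s, colAt padded j) = isbOf padded j := by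
  unfold keyOf colAt isbOf
  induction padded with
  | nil => rfl
  | cons l t ih =>
      simp only [List.map_cons, List.length_cons, List.replicate_succ, List.all_cons]
      simp only [List.cons_beq_cons, ih]

theorem find?_ne_space (l : List Char) :
    l.find? (fun c => c != ' ') = (l.dropWhile (fun c => c == ' ')).head? := by
  induction l with
  | nil => rfl
  | cons c t ih =>
      by_cases h : c = ' ' <;>
        simp [List.find?_cons, List.dropWhile_cons, h, ih]

theorem slice_eq_map_range' (l : List Char) (s e : Nat) (hse : s ≤ e) (hel : e ≤ l.length) :
    PySem.List.slice l (some (s : Int)) (some (e : Int))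
      = (List.range' s (e - s)).map (fun j => l.getD j ' ') := by
  rw [PySem.List.slice_natCast]
  apply List.ext_getElem
  · simp [List.length_range']; omega
  · intro k h1 h2
    have hk : k < e - s := by simpa [List.length_range'] using h2
    have hsk : s + k < l.length := by omega
    simp [List.getElem_range', List.getElem_drop, List.getD_eq_getElem?_getD,
      List.getElem?_eq_getElem, hsk]

theorem rows_eq_chunk_rows (padded : List (List Char)) (w s e : Nat)
    (hrect : ∀ l ∈ padded, w ≤ l.length) (hse : s ≤ e) (hew : e ≤ w) :
    (List.range padded.length).map
        (fun r => ((List.range' s (e - s)).map (colAt padded)).map (fun col => col.getD r ' '))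
      = padded.map (fun l => PySem.List.slice l (some (s : Int)) (some (e : Int))) := by
  apply List.ext_getElem
  · simp
  · intro r h1 h2
    have hr : r < padded.length := by simpa using h2
    simp only [List.getElem_map, List.getElem_range, List.map_map]
    rw [slice_eq_map_range' _ s e hse (le_trans hew (hrect _ (List.getElem_mem hr)))]
    apply List.map_congr_left
    intro j hj
    simp [colAt, List.getD_eq_getElem?_getD, List.getElem?_eq_getElem, hr]

theorem block_step (padded : List (List Char)) (w s e : Nat)
    (hrect : ∀ l ∈ padded, w ≤ l.length) (hse : s ≤ e) (hew : e ≤ w)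
    (acc : List (List String) × List String) :
    stepB padded.length acc
        (false, PySem.List.enumerate ((List.range' s (e - s)).map (colAt padded)) (s : Int))
      = stepA padded acc (s, e) := by
  unfold stepA stepB
  simp only [Bool.false_eq_true, if_false]
  rw [PySem.List.map_snd_enumerate]
  rw [rows_eq_chunk_rows padded w s e hrect hse hew]
  have hf := find?_ne_space ((padded.map (fun l => PySem.List.slice l (some (s:Int)) (some (e:Int)))).getLastD [])
  cases hd : List.dropWhile (fun c => c == ' ') ((padded.map (fun l => PySem.List.slice l (some (s:Int)) (some (e:Int)))).getLastD []) with
  | nil =>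
      rw [hd] at hf
      simp only [List.head?_nil] at hf
      rw [hf]
  | cons c t =>
      rw [hd] at hf
      simp only [List.head?_cons] at hf
      rw [hf]

theorem skip_true (n : Nat) (key : Int × List Char → Bool) (x : Int × List Char)
    (xs : List (Int × List Char)) (hx : key x = true)
    (acc : List (List String) × List String) :
    (groupRunsB key (x :: xs)).foldl (stepB n) acc
      = (groupRunsB key (xs.dropWhile (fun y => key y == true))).foldl (stepB n) acc := by
  rw [groupRunsB]
  simp only [hx, List.foldl_cons]
  have hstep : stepB n acc (true, x :: xs.takeWhile fun y => key y == true) = acc := by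
    unfold stepB; simp
  rw [hstep]

theorem fold_dropWhile (n : Nat) (key : Int × List Char → Bool)
    (l : List (Int × List Char)) (acc : List (List String) × List String) :
    (groupRunsB key l).foldl (stepB n) acc
      = (groupRunsB key (l.dropWhile (fun y => key y == true))).foldl (stepB n) acc := by
  cases l with
  | nil => rfl
  | cons y ys =>
      by_cases hy : key y = true
      · rw [skip_true n key y ys hy acc]
        simp [List.dropWhile_cons, hy]
      · simp [List.dropWhile_cons, Bool.of_not_eq_true hy]

-- takeWhile/dropWhile on the enumerated column suffix split exactly at advA
theorem split_adv (padded : List (List Char)) (w i : Nat) :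
    (PySem.List.enumerate ((List.range' i (w - i)).map (colAt padded)) (i : Int)).takeWhile
        (fun y => keyOf padded.length y == false)
      = PySem.List.enumerate
          ((List.range' i (advA (isbOf padded) w i - i)).map (colAt padded)) (i : Int)
  ∧ (PySem.List.enumerate ((List.range' i (w - i)).map (colAt padded)) (i : Int)).dropWhile
        (fun y => keyOf padded.length y == false)
      = PySem.List.enumerate
          ((List.range' (advA (isbOf padded) w i) (w - advA (isbOf padded) w i)).map (colAt padded))
          ((advA (isbOf padded) w i : Int)) := by
  by_cases hi : i < w
  · have hrange : List.range' i (w - i) = i :: List.range' (i + 1) (w - (i + 1)) := by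
      have h1 : w - i = (w - (i + 1)) + 1 := by omega
      rw [h1, List.range'_succ]
    have hpush : (i : Int) + 1 = ((i + 1 : Nat) : Int) := by push_cast; ring
    by_cases hb : isbOf padded i = true
    · have ha : advA (isbOf padded) w i = i := by rw [advA, if_pos hi, if_pos hb]
      have hk : (keyOf padded.length ((i : Int), colAt padded i) == false) = false := by
        rw [key_eq_isb, hb]; rfl
      rw [ha, hrange]
      constructor
      · simp only [List.map_cons, PySem.List.enumerate_cons, List.takeWhile_cons, hk,
          Bool.false_eq_true, if_false, Nat.sub_self, List.range'_zero, List.map_nil,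
          PySem.List.enumerate_nil]
      · simp only [List.map_cons, PySem.List.enumerate_cons, List.dropWhile_cons, hk,
          Bool.false_eq_true, if_false]
    · have hb' : isbOf padded i = false := Bool.of_not_eq_true hb
      have ha := advA_stepf (isbOf padded) w i hi hb'
      have ih := split_adv padded w (i + 1)
      have hadv1 := le_advA (isbOf padded) w (i + 1)
      rw [ha, hrange]
      simp only [List.map_cons, PySem.List.enumerate_cons, List.takeWhile_cons,
        List.dropWhile_cons, key_eq_isb, hb', hpush]
      constructor
      · simp only [beq_self_eq_true, if_true, ih.1]
        have h2 : List.range' i (advA (isbOf padded) w (i + 1) - i)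
            = i :: List.range' (i + 1) (advA (isbOf padded) w (i + 1) - (i + 1)) := by
          have h3 : advA (isbOf padded) w (i + 1) - i
              = (advA (isbOf padded) w (i + 1) - (i + 1)) + 1 := by omega
          rw [h3, List.range'_succ]
        rw [h2]
        simp only [List.map_cons, PySem.List.enumerate_cons, hpush]
      · simp only [beq_self_eq_true, if_true, ih.2]
  · have hw : w - i = 0 := by omega
    have ha : advA (isbOf padded) w i = i := by rw [advA, if_neg hi]
    rw [ha, hw]
    simp only [Nat.sub_self, List.range'_zero, List.map_nil, PySem.List.enumerate_nil,
      List.takeWhile_nil, List.dropWhile_nil, and_self]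
termination_by w - i
decreasing_by omega

theorem main_loop (padded : List (List Char)) (w : Nat)
    (hrect : ∀ l ∈ padded, w ≤ l.length) (i : Nat) (hiw : i ≤ w)
    (acc : List (List String) × List String) :
    (blocksA (isbOf padded) w i).foldl (stepA padded) acc
      = (groupRunsB (keyOf padded.length)
          (PySem.List.enumerate ((List.range' i (w - i)).map (colAt padded)) (i : Int))).foldl
            (stepB padded.length) acc := by
  by_cases hi : i < w
  · have hrange : List.range' i (w - i) = i :: List.range' (i + 1) (w - (i + 1)) := by
      have h1 : w - i = (w - (i + 1)) + 1 := by omega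
      rw [h1, List.range'_succ]
    have hpush : (i : Int) + 1 = ((i + 1 : Nat) : Int) := by push_cast; ring
    by_cases hb : isbOf padded i = true
    · -- blank column: A skips one index, B's run of blank columns is a skipped group
      have hA : blocksA (isbOf padded) w i = blocksA (isbOf padded) w (i + 1) := by
        rw [blocksA]; simp [hi, hb]
      rw [hA, main_loop padded w hrect (i + 1) (by omega) acc, hrange]
      simp only [List.map_cons, PySem.List.enumerate_cons, hpush]
      rw [skip_true padded.length (keyOf padded.length) _ _ (by rw [key_eq_isb]; exact hb) acc]
      rw [← fold_dropWhile]
    · -- non-blank column: A's block (i, advA i) is exactly B's false-key group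
      have hb' : isbOf padded i = false := Bool.of_not_eq_true hb
      have hgt : i + 1 ≤ advA (isbOf padded) w i := advA_gt _ _ _ hi hb'
      have haw : advA (isbOf padded) w i ≤ w := advA_le _ _ _ hiw
      have hia : i ≤ advA (isbOf padded) w i := le_advA _ _ _
      obtain ⟨ht, hd⟩ := split_adv padded w i
      have hk : keyOf padded.length ((i : Int), colAt padded i) = false := by
        rw [key_eq_isb]; exact hb'
      have hA : blocksA (isbOf padded) w i
          = (i, advA (isbOf padded) w i)
              :: blocksA (isbOf padded) w (advA (isbOf padded) w i) := by
        rw [blocksA]; simp [hi, hb']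
      rw [hA, List.foldl_cons,
        main_loop padded w hrect (advA (isbOf padded) w i) haw
          (stepA padded acc (i, advA (isbOf padded) w i)),
        hrange]
      simp only [List.map_cons, PySem.List.enumerate_cons, hpush]
      rw [groupRunsB, List.foldl_cons]
      simp only [hk]
      have hcons : ((i : Int), colAt padded i)
            :: (PySem.List.enumerate ((List.range' (i + 1) (w - (i + 1))).map (colAt padded))
                  (((i + 1 : Nat) : Int))).takeWhile (fun y => keyOf padded.length y == false)
          = (PySem.List.enumerate ((List.range' i (w - i)).map (colAt padded))
              (i : Int)).takeWhile (fun y => keyOf padded.length y == false) := by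
        rw [hrange]
        have hk2 : (keyOf padded.length ((i : Int), colAt padded i) == false) = true := by
          rw [hk]; rfl
        simp only [List.map_cons, PySem.List.enumerate_cons, List.takeWhile_cons, hk2,
          if_true, hpush]
      have hdrop : (PySem.List.enumerate ((List.range' (i + 1) (w - (i + 1))).map (colAt padded))
              (((i + 1 : Nat) : Int))).dropWhile (fun y => keyOf padded.length y == false)
          = PySem.List.enumerate
              ((List.range' (advA (isbOf padded) w i)
                  (w - advA (isbOf padded) w i)).map (colAt padded))
              ((advA (isbOf padded) w i : Int)) := by
        rw [← hd, hrange]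
        have hk2 : (keyOf padded.length ((i : Int), colAt padded i) == false) = true := by
          rw [hk]; rfl
        simp only [List.map_cons, PySem.List.enumerate_cons, List.dropWhile_cons, hk2,
          if_true, hpush]
      rw [hcons, ht, hdrop,
        block_step padded w i (advA (isbOf padded) w i) hrect hia haw acc]
  · have hw : w - i = 0 := by omega
    have hA : blocksA (isbOf padded) w i = [] := by rw [blocksA]; simp [hi]
    rw [hA, hw]
    simp only [List.range'_zero, List.map_nil, PySem.List.enumerate_nil, groupRunsB,
      List.foldl_nil]
termination_by w - i
decreasing_by
  · omega
  · omega

-- ===== VERDICT (by name: the statement is the Claim_ definition above) =====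
theorem parse_spec : Claim_equal_parse := by
  intro raw _ _
  unfold Spec_parse parse parse_alt
  simp only [padA]
  have hrect : ∀ l ∈ ((PySem.Str.splitlines raw).map String.toList).map
      (fun l => l ++ List.replicate
        ((PySem.List.max? (((PySem.Str.splitlines raw).map String.toList).map (·.length))
            (fun x => x)).getD 0 - l.length) ' '),
      (PySem.List.max? (((PySem.Str.splitlines raw).map String.toList).map (·.length))
          (fun x => x)).getD 0 ≤ l.length := by
    intro l hl
    simp only [List.mem_map] at hl
    obtain ⟨l0, _, rfl⟩ := hl
    simp [List.length_append]
    omega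
  have h := main_loop _ _ hrect 0 (Nat.zero_le _) ([], [])
  rw [Nat.sub_zero, ← List.range_eq_range'] at h
  simpa using h
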